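-- pv_equiv track=rewrite | github.com/peytontolbert/Research_Library | models/mirrormind/persona.py | _infer_style
-- ===== SOURCE A (Python) =====
-- from typing import Dict, List, Optional, Sequence
--
-- def _infer_style(concepts: List[Dict[str, str]]) -> Dict[str, str]:
--     """Lightweight heuristics for repository style: look at kinds and signatures."""
--     if not concepts:
--         return {}
--     kinds = [c.get("kind", "") for c in concepts]
--     has_tests = any("test" in (c.get("name") or "").lower() for c in concepts)
--     has_cuda = any("cuda" in (c.get("code") or "").lower() for c in concepts)
--     has_types = any("->" in (c.get("signature") or "") or ":" in (c.get("signature") or "") for c in concepts)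
--     doc_tokens = []
--     for c in concepts:
--         doc = c.get("doc") or c.get("summary") or ""
--         doc_tokens.extend(doc.lower().split())
--     style = {
--         "architecture_style": "modular" if "module" in kinds else "monolith",
--         "testing_style": "unit-heavy" if has_tests else "sparse-tests",
--         "performance_bias": "cuda-kernels" if has_cuda else "standard-python",
--         "type_hints_density": "typed" if has_types else "untyped",
--     }
--     if any("async" in t for t in doc_tokens):
--         style["concurrency_bias"] = "async"
--     if any("cuda" in t or "gpu" in t for t in doc_tokens):
--         style["hardware_bias"] = "gpu"
--     return style
-- ===== SOURCE B (Python) =====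
-- """Map-reduce restructuring: each concept is mapped to a set of feature tags,
-- the tag sets are unioned, and the style dict is assembled from a rules table
-- by membership tests in the unified tag set."""
--
-- _BASE_RULES = [
--     ("module", "architecture_style", "modular", "monolith"),
--     ("tests", "testing_style", "unit-heavy", "sparse-tests"),
--     ("cuda-code", "performance_bias", "cuda-kernels", "standard-python"),
--     ("types", "type_hints_density", "typed", "untyped"),
-- ]
-- _OPT_RULES = [
--     ("doc-async", "concurrency_bias", "async"),
--     ("doc-gpu", "hardware_bias", "gpu"),
-- ]
--
--
-- def _features(c):
--     """The set of style-relevant feature tags exhibited by one concept."""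
--     feats = set()
--     if c.get("kind", "") == "module":
--         feats.add("module")
--     if "test" in (c.get("name") or "").lower():
--         feats.add("tests")
--     if "cuda" in (c.get("code") or "").lower():
--         feats.add("cuda-code")
--     sig = c.get("signature") or ""
--     if "->" in sig or ":" in sig:
--         feats.add("types")
--     for t in (c.get("doc") or c.get("summary") or "").lower().split():
--         if "async" in t:
--             feats.add("doc-async")
--         if "cuda" in t or "gpu" in t:
--             feats.add("doc-gpu")
--     return feats
--
--
-- def _infer_style(concepts):
--     if not concepts:
--         return {}
--     feats = set().union(*map(_features, concepts))
--     style = {key: yes if tag in feats else no for tag, key, yes, no in _BASE_RULES}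
--     for tag, key, val in _OPT_RULES:
--         if tag in feats:
--             style[key] = val
--     return style
-- ===== Notes on version B (the rewrite author's own statement) =====
-- stated objective: alternative
-- what changed: Replaced A's six independent whole-list scans and materialised kinds/doc_tokens lists by a map-reduce over feature-tag sets: each concept is mapped to a set of tags by _features, the sets are unioned, and the style dict is assembled from membership tests driven by declarative rules tables.
import Mathlib
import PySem

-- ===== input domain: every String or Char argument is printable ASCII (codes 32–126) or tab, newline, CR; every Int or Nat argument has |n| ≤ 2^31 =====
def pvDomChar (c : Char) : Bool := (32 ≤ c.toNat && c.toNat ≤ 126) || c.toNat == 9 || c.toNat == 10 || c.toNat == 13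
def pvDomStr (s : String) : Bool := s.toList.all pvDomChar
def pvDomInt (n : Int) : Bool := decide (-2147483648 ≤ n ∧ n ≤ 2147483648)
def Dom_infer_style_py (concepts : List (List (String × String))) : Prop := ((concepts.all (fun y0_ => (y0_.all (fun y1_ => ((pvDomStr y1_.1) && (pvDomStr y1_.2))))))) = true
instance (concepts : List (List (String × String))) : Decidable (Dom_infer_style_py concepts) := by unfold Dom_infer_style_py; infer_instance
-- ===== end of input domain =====

-- B restructures A as a map-reduce over per-concept feature-tag sets (mapped, then unioned) plus a table-driven assembly of the style dict; same values everywhere.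

-- ===== PORT A =====
-- A-side helpers: c.get(k, "") on the dict, and Python's 'x or y' on strings ("" is falsy)
def pvGetA (c : List (String × String)) (k : String) : String :=
  (PySem.Dict.mk c).getD k ""

def pvStrOrA (s t : String) : String := if s = "" then t else s

def infer_style_py (concepts : List (List (String × String))) : List (String × String) :=
  if concepts = [] then []
  else
    let kinds := concepts.map (fun c => pvGetA c "kind")
    let has_tests := concepts.any (fun c => PySem.Str.isIn "test" (PySem.Str.lower (pvStrOrA (pvGetA c "name") "")))
    let has_cuda := concepts.any (fun c => PySem.Str.isIn "cuda" (PySem.Str.lower (pvStrOrA (pvGetA c "code") "")))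
    let has_types := concepts.any (fun c =>
      PySem.Str.isIn "->" (pvStrOrA (pvGetA c "signature") "") || PySem.Str.isIn ":" (pvStrOrA (pvGetA c "signature") ""))
    let doc_tokens := concepts.foldl (fun acc c =>
      acc ++ PySem.Str.split₀ (PySem.Str.lower (pvStrOrA (pvGetA c "doc") (pvStrOrA (pvGetA c "summary") "")))) []
    let style := [("architecture_style", if "module" ∈ kinds then "modular" else "monolith"),
                  ("testing_style", if has_tests then "unit-heavy" else "sparse-tests"),
                  ("performance_bias", if has_cuda then "cuda-kernels" else "standard-python"),
                  ("type_hints_density", if has_types then "typed" else "untyped")]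
    let style := if doc_tokens.any (fun t => PySem.Str.isIn "async" t) then style ++ [("concurrency_bias", "async")] else style
    let style := if doc_tokens.any (fun t => PySem.Str.isIn "cuda" t || PySem.Str.isIn "gpu" t) then style ++ [("hardware_bias", "gpu")] else style
    style

-- ===== PORT B =====
-- B-side helpers: Source B's module-level rules tables, dict getter and 'or' fallback
def pvBaseRules : List (String × String × String × String) :=
  [("module", "architecture_style", "modular", "monolith"),
   ("tests", "testing_style", "unit-heavy", "sparse-tests"),
   ("cuda-code", "performance_bias", "cuda-kernels", "standard-python"),
   ("types", "type_hints_density", "typed", "untyped")]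

def pvOptRules : List (String × String × String) :=
  [("doc-async", "concurrency_bias", "async"),
   ("doc-gpu", "hardware_bias", "gpu")]

def pvGetB (c : List (String × String)) (k : String) : String :=
  (PySem.Dict.mk c).getD k ""

def pvStrOrB (s t : String) : String := if s = "" then t else s

-- the body of _features' for-loop over doc tokens
def pvDocStep (f : PySem.Set String) (t : String) : PySem.Set String :=
  let f := if PySem.Str.isIn "async" t then PySem.Set.add f "doc-async" else f
  if PySem.Str.isIn "cuda" t || PySem.Str.isIn "gpu" t then PySem.Set.add f "doc-gpu" else f

-- Source B's _features: the set of feature tags exhibited by one concept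
def pvFeatures (c : List (String × String)) : PySem.Set String :=
  let f : PySem.Set String := PySem.Set.empty
  let f := if pvGetB c "kind" = "module" then PySem.Set.add f "module" else f
  let f := if PySem.Str.isIn "test" (PySem.Str.lower (pvStrOrB (pvGetB c "name") "")) then PySem.Set.add f "tests" else f
  let f := if PySem.Str.isIn "cuda" (PySem.Str.lower (pvStrOrB (pvGetB c "code") "")) then PySem.Set.add f "cuda-code" else f
  let sig := pvStrOrB (pvGetB c "signature") ""
  let f := if PySem.Str.isIn "->" sig || PySem.Str.isIn ":" sig then PySem.Set.add f "types" else f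
  (PySem.Str.split₀ (PySem.Str.lower (pvStrOrB (pvGetB c "doc") (pvStrOrB (pvGetB c "summary") "")))).foldl pvDocStep f

def infer_style_py_alt (concepts : List (List (String × String))) : List (String × String) :=
  match concepts with
  | [] => []
  | _ :: _ =>
    -- set().union(*map(_features, concepts)) as a fold of Set.union
    let feats := concepts.foldl (fun s c => PySem.Set.union s (pvFeatures c)) PySem.Set.empty
    -- dict comprehension over the base rules table
    let style := pvBaseRules.map (fun r => (r.2.1, if r.1 ∈ feats then r.2.2.1 else r.2.2.2))
    -- optional rules: style[key] = val when the tag is present (keys are fresh, so insertion appends)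
    pvOptRules.foldl (fun st r => if r.1 ∈ feats then st ++ [(r.2.1, r.2.2)] else st) style

-- ===== PRECONDITION & SPEC =====
def Spec_infer_style_py (concepts : List (List (String × String))) (out : List (String × String)) : Prop := out = infer_style_py_alt concepts
instance (concepts : List (List (String × String))) (out : List (String × String)) : Decidable (Spec_infer_style_py concepts out) := by unfold Spec_infer_style_py; infer_instance

-- ===== CLAIM =====
def Claim_equal_infer_style_py : Prop := ∀ (concepts : List (List (String × String))), Dom_infer_style_py concepts → Spec_infer_style_py concepts (infer_style_py concepts)

-- ===== LEMMAS AND PROOFS =====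

-- A's and B's dict/"or" helpers are the same functions under different names
theorem pvGetAB : pvGetA = pvGetB := rfl
theorem pvStrOrAB : pvStrOrA = pvStrOrB := rfl

-- membership in B's doc-token sub-fold
set_option maxHeartbeats 2000000 in
theorem pvMemDocFold (toks : List String) (f : PySem.Set String) (y : String) :
    (y ∈ toks.foldl pvDocStep f)
    ↔ (y ∈ f
       ∨ (y = "doc-async" ∧ toks.any (fun t => PySem.Str.isIn "async" t) = true)
       ∨ (y = "doc-gpu" ∧ toks.any (fun t => PySem.Str.isIn "cuda" t || PySem.Str.isIn "gpu" t) = true)) := by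
  induction toks generalizing f with
  | nil => simp
  | cons t ts ih =>
    rw [List.foldl_cons]
    simp only [pvDocStep, ih, List.any_cons]
    split_ifs with h1 h2 <;>
      simp only [PySem.Set.mem_add, Bool.or_eq_true] at * <;> tauto

-- membership of each feature tag in a single concept's feature set
set_option maxHeartbeats 1000000 in
theorem pvFeatModule (c : List (String × String)) :
    (("module":String) ∈ pvFeatures c) ↔ pvGetB c "kind" = "module" := by
  simp only [pvFeatures]; rw [pvMemDocFold]; simp; split_ifs <;> simp_all

set_option maxHeartbeats 1000000 in
theorem pvFeatTests (c : List (String × String)) :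
    (("tests":String) ∈ pvFeatures c) ↔ PySem.Str.isIn "test" (PySem.Str.lower (pvStrOrB (pvGetB c "name") "")) = true := by
  simp only [pvFeatures]; rw [pvMemDocFold]; simp; split_ifs <;> simp_all

set_option maxHeartbeats 1000000 in
theorem pvFeatCuda (c : List (String × String)) :
    (("cuda-code":String) ∈ pvFeatures c) ↔ PySem.Str.isIn "cuda" (PySem.Str.lower (pvStrOrB (pvGetB c "code") "")) = true := by
  simp only [pvFeatures]; rw [pvMemDocFold]; simp; split_ifs <;> simp_all

set_option maxHeartbeats 1000000 in
theorem pvFeatTypes (c : List (String × String)) :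
    (("types":String) ∈ pvFeatures c) ↔ (PySem.Str.isIn "->" (pvStrOrB (pvGetB c "signature") "") || PySem.Str.isIn ":" (pvStrOrB (pvGetB c "signature") "")) = true := by
  simp only [pvFeatures]; rw [pvMemDocFold]; simp; split_ifs <;> simp_all

set_option maxHeartbeats 1000000 in
theorem pvFeatAsync (c : List (String × String)) :
    (("doc-async":String) ∈ pvFeatures c) ↔ (PySem.Str.split₀ (PySem.Str.lower (pvStrOrB (pvGetB c "doc") (pvStrOrB (pvGetB c "summary") "")))).any (fun t => PySem.Str.isIn "async" t) = true := by
  simp only [pvFeatures]; rw [pvMemDocFold]; simp; split_ifs <;> simp_all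

set_option maxHeartbeats 1000000 in
theorem pvFeatGpu (c : List (String × String)) :
    (("doc-gpu":String) ∈ pvFeatures c) ↔ (PySem.Str.split₀ (PySem.Str.lower (pvStrOrB (pvGetB c "doc") (pvStrOrB (pvGetB c "summary") "")))).any (fun t => PySem.Str.isIn "cuda" t || PySem.Str.isIn "gpu" t) = true := by
  simp only [pvFeatures]; rw [pvMemDocFold]; simp; split_ifs <;> simp_all

-- membership in B's union fold is membership in some concept's feature set
theorem pvMemUnionFold (l : List (List (String × String))) (s : PySem.Set String) (y : String) :
    (y ∈ l.foldl (fun s c => PySem.Set.union s (pvFeatures c)) s)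
    ↔ (y ∈ s ∨ ∃ c ∈ l, y ∈ pvFeatures c) := by
  induction l generalizing s with
  | nil => simp
  | cons c cs ih =>
    rw [List.foldl_cons]
    simp only [ih, PySem.Set.mem_union, List.exists_mem_cons_iff]
    exact or_assoc

-- the six tag-membership conditions of B, each rewritten to A's corresponding scan
theorem pvTagModule (l : List (List (String × String))) :
    (("module":String) ∈ l.foldl (fun s c => PySem.Set.union s (pvFeatures c)) PySem.Set.empty)
    ↔ "module" ∈ l.map (fun c => pvGetB c "kind") := by
  rw [pvMemUnionFold]
  simp only [PySem.Set.empty, List.not_mem_nil, false_or, List.mem_map]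
  exact exists_congr fun c => and_congr_right fun _ => pvFeatModule c

theorem pvTagTests (l : List (List (String × String))) :
    (("tests":String) ∈ l.foldl (fun s c => PySem.Set.union s (pvFeatures c)) PySem.Set.empty)
    ↔ l.any (fun c => PySem.Str.isIn "test" (PySem.Str.lower (pvStrOrB (pvGetB c "name") ""))) = true := by
  rw [pvMemUnionFold]
  simp only [PySem.Set.empty, List.not_mem_nil, false_or]
  rw [List.any_eq_true]
  exact exists_congr fun c => and_congr_right fun _ => pvFeatTests c

theorem pvTagCuda (l : List (List (String × String))) :
    (("cuda-code":String) ∈ l.foldl (fun s c => PySem.Set.union s (pvFeatures c)) PySem.Set.empty)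
    ↔ l.any (fun c => PySem.Str.isIn "cuda" (PySem.Str.lower (pvStrOrB (pvGetB c "code") ""))) = true := by
  rw [pvMemUnionFold]
  simp only [PySem.Set.empty, List.not_mem_nil, false_or]
  rw [List.any_eq_true]
  exact exists_congr fun c => and_congr_right fun _ => pvFeatCuda c

theorem pvTagTypes (l : List (List (String × String))) :
    (("types":String) ∈ l.foldl (fun s c => PySem.Set.union s (pvFeatures c)) PySem.Set.empty)
    ↔ l.any (fun c => PySem.Str.isIn "->" (pvStrOrB (pvGetB c "signature") "") || PySem.Str.isIn ":" (pvStrOrB (pvGetB c "signature") "")) = true := by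
  rw [pvMemUnionFold]
  simp only [PySem.Set.empty, List.not_mem_nil, false_or]
  rw [List.any_eq_true]
  exact exists_congr fun c => and_congr_right fun _ => pvFeatTypes c

theorem pvTagAsync (l : List (List (String × String))) :
    (("doc-async":String) ∈ l.foldl (fun s c => PySem.Set.union s (pvFeatures c)) PySem.Set.empty)
    ↔ l.any (fun c => (PySem.Str.split₀ (PySem.Str.lower (pvStrOrB (pvGetB c "doc") (pvStrOrB (pvGetB c "summary") "")))).any (fun t => PySem.Str.isIn "async" t)) = true := by
  rw [pvMemUnionFold]
  simp only [PySem.Set.empty, List.not_mem_nil, false_or]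
  rw [List.any_eq_true]
  exact exists_congr fun c => and_congr_right fun _ => pvFeatAsync c

theorem pvTagGpu (l : List (List (String × String))) :
    (("doc-gpu":String) ∈ l.foldl (fun s c => PySem.Set.union s (pvFeatures c)) PySem.Set.empty)
    ↔ l.any (fun c => (PySem.Str.split₀ (PySem.Str.lower (pvStrOrB (pvGetB c "doc") (pvStrOrB (pvGetB c "summary") "")))).any (fun t => PySem.Str.isIn "cuda" t || PySem.Str.isIn "gpu" t)) = true := by
  rw [pvMemUnionFold]
  simp only [PySem.Set.empty, List.not_mem_nil, false_or]
  rw [List.any_eq_true]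
  exact exists_congr fun c => and_congr_right fun _ => pvFeatGpu c

-- A's accumulated doc_tokens list, queried with .any, equals a per-concept any
theorem pvAnyFoldAppend (l : List (List (String × String))) (init : List String)
    (h : List (String × String) → List String) (p : String → Bool) :
    (l.foldl (fun acc c => acc ++ h c) init).any p = (init.any p || l.any (fun c => (h c).any p)) := by
  induction l generalizing init with
  | nil => simp
  | cons c cs ih => simp [Function.comp_def]

-- ===== VERDICT =====
set_option maxHeartbeats 2000000 in
theorem infer_style_py_spec : Claim_equal_infer_style_py := by
  intro concepts _
  unfold Spec_infer_style_py
  cases concepts with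
  | nil => rfl
  | cons c cs =>
    simp only [infer_style_py, infer_style_py_alt, pvGetAB, pvStrOrAB,
      if_neg (List.cons_ne_nil c cs)]
    generalize hF : List.foldl (fun s c => PySem.Set.union s (pvFeatures c)) PySem.Set.empty (c :: cs) = F
    simp only [pvBaseRules, pvOptRules, List.map_cons, List.map_nil, List.foldl_cons, List.foldl_nil]
    rw [← hF]
    simp only [pvTagModule, pvTagTests, pvTagCuda, pvTagTypes, pvTagAsync, pvTagGpu,
      pvAnyFoldAppend, List.map_cons, List.mem_cons, List.any_cons, List.nil_append,
      Bool.or_eq_true]
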